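-- pv_equiv track=rewrite | github.com/arindhimar/BluePineapple | Python Programs/17-02-26/314.py | max_sum_brute_force
-- ===== SOURCE A (Python) =====
-- def max_sum_brute_force(arr):
--     n = len(arr)
--     max_sum = 0
--
--     for i in range(n):
--         curr_sum = arr[i]
--         j = i + 2
--         while j < n:
--             curr_sum += arr[j]
--             j += 2
--         if curr_sum > max_sum:
--             max_sum = curr_sum
--
--     return max_sum
-- ===== SOURCE B (Python) =====
-- def max_sum_brute_force(arr):
--     s1 = s2 = best = 0
--     for a in reversed(arr):
--         s = a + s2
--         best = max(best, s)
--         s1, s2 = s, s1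
--     return best
-- ===== Notes on version B (the rewrite author's own statement) =====
-- stated objective: faster
-- what changed: Replaces the quadratic per-index strided re-summation with a single backward pass maintaining the two strided suffix sums S[i+1], S[i+2] via the recurrence S[i]=arr[i]+S[i+2], taking the running max (floored at 0).
import Mathlib
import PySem

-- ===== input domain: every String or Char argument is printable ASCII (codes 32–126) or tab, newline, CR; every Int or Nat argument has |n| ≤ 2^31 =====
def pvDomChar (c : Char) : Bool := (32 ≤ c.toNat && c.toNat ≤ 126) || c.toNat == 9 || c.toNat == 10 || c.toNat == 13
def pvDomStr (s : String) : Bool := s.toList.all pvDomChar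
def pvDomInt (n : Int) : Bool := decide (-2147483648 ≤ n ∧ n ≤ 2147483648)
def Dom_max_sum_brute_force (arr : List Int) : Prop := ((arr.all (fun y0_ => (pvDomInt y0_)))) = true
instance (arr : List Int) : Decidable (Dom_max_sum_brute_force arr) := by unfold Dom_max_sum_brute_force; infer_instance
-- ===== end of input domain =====

-- B replaces A's quadratic per-index strided re-summation with one backward pass
-- using the recurrence S[i] = arr[i] + S[i+2]; objective: faster (asymptotic).

-- ===== PORT A =====
-- inner 'while j < n: curr_sum += arr[j]; j += 2'
def pvInnerA (arr : List Int) (n j curr : Int) : Int :=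
  if _h : j < n then
    pvInnerA arr n (j + 2) (curr + (PySem.List.pyGet? arr j).getD 0)
  else curr
termination_by (n - j).toNat
decreasing_by omega

-- outer 'for i in range(n)' with accumulator max_sum
def pvOuterA (arr : List Int) (n i max_sum : Int) : Int :=
  if _h : i < n then
    let curr := pvInnerA arr n (i + 2) ((PySem.List.pyGet? arr i).getD 0)
    pvOuterA arr n (i + 1) (if max_sum < curr then curr else max_sum)
  else max_sum
termination_by (n - i).toNat
decreasing_by omega

def max_sum_brute_force (arr : List Int) : Int :=
  pvOuterA arr (arr.length : Int) 0 0

-- ===== PORT B =====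
-- one backward pass (fold from the right) with state (s1, s2, best):
-- s = a + s2; best = max best s; (s1, s2) := (s, s1)
def max_sum_brute_force_alt (arr : List Int) : Int :=
  (arr.foldr (fun a (st : Int × Int × Int) =>
      let s := a + st.2.1
      (s, st.1, max st.2.2 s)) (0, 0, 0)).2.2

-- ===== PRECONDITION & SPEC =====
def Spec_max_sum_brute_force (arr : List Int) (out : Int) : Prop := out = max_sum_brute_force_alt arr
instance (arr : List Int) (out : Int) : Decidable (Spec_max_sum_brute_force arr out) := by unfold Spec_max_sum_brute_force; infer_instance

-- ===== CLAIM (what is proved, stated in full; the proofs are below) =====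
def Claim_equal_max_sum_brute_force : Prop := ∀ (arr : List Int), Dom_max_sum_brute_force arr → Spec_max_sum_brute_force arr (max_sum_brute_force arr)

-- ===== LEMMAS AND PROOFS =====

-- strided suffix sum: S (a :: t) = a + S (t.drop 1)
def pvS : List Int → Int
  | [] => 0
  | a :: t => a + pvS (t.drop 1)
termination_by l => l.length
decreasing_by simp

theorem pvS_nil : pvS [] = 0 := by simp [pvS]

theorem pvS_cons (a : Int) (t : List Int) : pvS (a :: t) = a + pvS (t.drop 1) := by
  rw [pvS]

-- max over all strided suffix sums, floored at 0
def pvM : List Int → Int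
  | [] => 0
  | a :: t => max (pvS (a :: t)) (pvM t)

theorem pvS_drop (arr : List Int) (j : Nat) :
    pvS (arr.drop j) = (if h : j < arr.length
      then arr[j] + pvS (arr.drop (j + 2)) else 0) := by
  split
  · next h =>
    rw [List.drop_eq_getElem_cons h, pvS_cons]
    congr 1
    rw [List.drop_drop]
  · next h =>
    rw [List.drop_eq_nil_of_le (by omega), pvS_nil]

theorem pvInnerA_eq (arr : List Int) (j : Nat) (c : Int) :
    pvInnerA arr (arr.length : Int) (j : Int) c = c + pvS (arr.drop j) := by
  induction hn : arr.length - j using Nat.strong_induction_on generalizing j c with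
  | _ m ih =>
    rw [pvInnerA, pvS_drop]
    split
    · next h =>
      have hj : j < arr.length := by exact_mod_cast h
      have h2 : ((j : Int) + 2) = ((j + 2 : Nat) : Int) := by push_cast; ring
      rw [h2, ih (arr.length - (j + 2)) (by omega) (j + 2) _ rfl]
      rw [PySem.List.pyGet?_natCast, List.getElem?_eq_getElem hj]
      simp [hj]
      ring
    · next h =>
      have hj : ¬ j < arr.length := by exact_mod_cast fun hh => h (by exact_mod_cast hh)
      simp [hj]

theorem pvM_nonneg (l : List Int) : 0 ≤ pvM l := by
  induction l with
  | nil => simp [pvM]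
  | cons a t ih => rw [pvM]; omega

theorem pvM_drop (arr : List Int) (j : Nat) (h : j < arr.length) :
    pvM (arr.drop j) = max (pvS (arr.drop j)) (pvM (arr.drop (j + 1))) := by
  rw [List.drop_eq_getElem_cons h, pvM, ← List.drop_eq_getElem_cons h]

theorem pvOuterA_eq (arr : List Int) (j : Nat) (ms : Int) (hms : 0 ≤ ms) :
    pvOuterA arr (arr.length : Int) (j : Int) ms = max ms (pvM (arr.drop j)) := by
  induction hn : arr.length - j using Nat.strong_induction_on generalizing j ms with
  | _ m ih =>
    rw [pvOuterA]
    split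
    · next h =>
      have hj : j < arr.length := by exact_mod_cast h
      have h2 : ((j : Int) + 2) = ((j + 2 : Nat) : Int) := by push_cast; ring
      have h1 : ((j : Int) + 1) = ((j + 1 : Nat) : Int) := by push_cast; ring
      have hget : (PySem.List.pyGet? arr (j : Int)).getD 0 = arr[j] := by
        rw [PySem.List.pyGet?_natCast, List.getElem?_eq_getElem hj]; rfl
      have hcurr : pvInnerA arr (arr.length : Int) ((j : Int) + 2)
          ((PySem.List.pyGet? arr (j : Int)).getD 0) = pvS (arr.drop j) := by
        rw [hget, h2, pvInnerA_eq]
        conv_rhs => rw [pvS_drop arr j]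
        simp [hj]
      simp only [hcurr]
      rw [h1, ih (arr.length - (j + 1)) (by omega) (j + 1) _ (by omega) rfl]
      rw [pvM_drop arr j hj]
      omega
    · next h =>
      have hj : arr.length ≤ j := by
        by_contra hc
        exact h (by exact_mod_cast Nat.lt_of_not_le hc)
      rw [List.drop_eq_nil_of_le hj, pvM]
      omega

theorem pvFoldrB (arr : List Int) :
    arr.foldr (fun a (st : Int × Int × Int) =>
      let s := a + st.2.1
      (s, st.1, max st.2.2 s)) (0, 0, 0)
    = (pvS arr, pvS (arr.drop 1), pvM arr) := by
  induction arr with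
  | nil => simp [pvS_nil, pvM]
  | cons a t ih =>
    simp only [List.foldr_cons, ih]
    rw [pvS_cons, pvM, pvS_cons]
    simp [max_comm]

-- ===== VERDICT (by name: the statement is the Claim_ definition above) =====
theorem max_sum_brute_force_spec : Claim_equal_max_sum_brute_force := by
  intro arr _
  unfold Spec_max_sum_brute_force max_sum_brute_force max_sum_brute_force_alt
  rw [pvFoldrB]
  have := pvOuterA_eq arr 0 0 le_rfl
  simp only [Nat.cast_zero, List.drop_zero] at this
  simp only at this ⊢
  rw [this]
  have := pvM_nonneg arr
  omega
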